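-- pv_equiv track=rewrite | github.com/weibin666/wb_algorithm | hw/哈希表/02_魔法古卷中的三字符咒语统计.py | max_3_substring
-- ===== SOURCE A (Python) =====
-- from typing import List  # 引入 List 类型，用于函数返回值类型声明
--
-- def max_3_substring(s: str) -> List[str]:
--     from collections import Counter  # 从 collections 模块中引入 Counter，用于计算各子串出现的频率
--
--     # 使用 Counter 统计所有长度为 3 的子串的出现次数
--     # s[i:i + 3] 为从索引 i 开始的长度为 3 的子串，i 的范围是 [0, len(s) - 3]
--     '''
--     关键代码如下：
--     c = Counter(s[i:i + 3] for i in range(len(s) - 2))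
--     mx = max(c.values())
--     '''
--     c = Counter(s[i:i + 3] for i in range(len(s) - 2))
--
--     # 计算出出现次数的最大值（即最大频率）
--     mx = max(c.values())
--
--     # 查找所有出现次数等于最大频率的子串，并取出其中字典序最小的一个
--     s = min(k for k, v in c.items() if v == mx)
--
--     # 返回一个包含最频繁的子串和它的出现次数的列表，注意次数需要转换成字符串形式
--     return [s, str(mx)]
-- ===== SOURCE B (Python) =====
-- def max_3_substring(s):
--     # Single pass: maintain the counts dict and the current best (key, count)
--     # online; counts only grow, so the running argmax with lex tie-break is exact.
--     counts = {}
--     best_key = None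
--     best_cnt = 0
--     for i in range(len(s) - 2):
--         sub = s[i:i + 3]
--         c = counts.get(sub, 0) + 1
--         counts[sub] = c
--         if best_key is None or c > best_cnt or (c == best_cnt and sub < best_key):
--             best_key, best_cnt = sub, c
--     if best_key is None:
--         raise ValueError("max() iterable argument is empty")
--     return [best_key, str(best_cnt)]
-- ===== Notes on version B (the rewrite author's own statement) =====
-- stated objective: alternative
-- what changed: Instead of building the Counter and then making two more passes (max over values, min over keys with that value), B tracks the best (count, lexicographically-smallest key) online in the same single pass that builds the counts dict, exploiting that counts only increase.
import Mathlib
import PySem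

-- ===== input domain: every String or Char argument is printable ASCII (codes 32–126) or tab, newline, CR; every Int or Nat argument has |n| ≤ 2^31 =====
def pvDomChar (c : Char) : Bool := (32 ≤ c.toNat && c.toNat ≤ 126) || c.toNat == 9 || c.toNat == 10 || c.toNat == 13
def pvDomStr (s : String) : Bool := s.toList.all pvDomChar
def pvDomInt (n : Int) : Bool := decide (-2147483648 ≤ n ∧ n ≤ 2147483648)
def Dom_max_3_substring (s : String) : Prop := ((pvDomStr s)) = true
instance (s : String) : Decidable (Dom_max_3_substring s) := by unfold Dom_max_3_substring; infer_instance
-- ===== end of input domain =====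

-- B differs from A only in the pass structure (online argmax instead of two extra
-- passes over the Counter); same return value everywhere A returns.

-- the generator 's[i:i+3] for i in range(len(s) - 2)' (identical in both Pythons)
def pvSubs (cs : List Char) : List (List Char) :=
  (PySem.List.pyRange 0 ((cs.length : Int) - 2) 1).map
    (fun i => PySem.Chars.slice cs (some i) (some (i + 3)))

-- ===== PORT A =====
def max_3_substring (s : String) : List String :=
  match PySem.List.max? (PySem.Dict.counter (pvSubs s.toList)).values (fun v => v) with
  | none => []  -- Python: max() raises ValueError (excluded by Pre_)
  | some mx =>
    match PySem.List.min?
        (((PySem.Dict.counter (pvSubs s.toList)).items.filter (fun kv => kv.2 == mx)).map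
          (fun kv => kv.1)) (fun k => k) with
    | none => []  -- unreachable: mx occurs among the values
    | some k => [String.ofList k, PySem.Int.toStr mx]

-- ===== PORT B =====
def altStep (st : (PySem.Dict (List Char) Int) × Option (List Char) × Int)
    (sub : List Char) : (PySem.Dict (List Char) Int) × Option (List Char) × Int :=
  let c := st.1.getD sub 0 + 1
  let d := st.1.insert sub c
  match st.2.1 with
  | none => (d, some sub, c)
  | some bk =>
      if c > st.2.2 ∨ (c = st.2.2 ∧ sub < bk) then (d, some sub, c) else (d, some bk, st.2.2)

def max_3_substring_alt (s : String) : List String :=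
  match ((pvSubs s.toList).foldl altStep (PySem.Dict.empty, none, 0)).2.1 with
  | none => []  -- Python B: raise ValueError (excluded by Pre_)
  | some bk =>
      [String.ofList bk,
        PySem.Int.toStr ((pvSubs s.toList).foldl altStep (PySem.Dict.empty, none, 0)).2.2]

-- ===== PRECONDITION & SPEC =====
-- Pre_ excludes strings of length < 3, on which A's max() (and B's guard) raises ValueError.
def Pre_max_3_substring (s : String) : Prop := 3 ≤ s.toList.length
instance (s : String) : Decidable (Pre_max_3_substring s) := by
  unfold Pre_max_3_substring; infer_instance

def pvWitness_max_3_substring : String := "abcab"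

def Spec_max_3_substring (s : String) (out : List String) : Prop := out = max_3_substring_alt s
instance (s : String) (out : List String) : Decidable (Spec_max_3_substring s out) := by
  unfold Spec_max_3_substring; infer_instance

-- ===== CLAIM (what is proved, stated in full; the proofs are below) =====
def Claim_equal_max_3_substring : Prop :=
  ∀ (s : String), Dom_max_3_substring s → Pre_max_3_substring s →
    Spec_max_3_substring s (max_3_substring s)

-- ===== LEMMAS AND PROOFS =====

-- the loop invariant for B's online best: bk has the maximal count and is the
-- lexicographically least key attaining it
def GoodBest (l : List (List Char)) (bo : Option (List Char)) (bc : Int) : Prop :=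
  match bo with
  | none => l = []
  | some bk => bk ∈ l ∧ bc = (l.count bk : Int) ∧
      (∀ y ∈ l, (l.count y : Int) ≤ bc) ∧
      (∀ y ∈ l, (l.count y : Int) = bc → bk ≤ y)

theorem altStep_inv (x : List Char) (l : List (List Char))
    (st : (PySem.Dict (List Char) Int) × Option (List Char) × Int)
    (hd : ∀ k, st.1.getD k 0 = (l.count k : Int))
    (hb : GoodBest l st.2.1 st.2.2) :
    (∀ k, (altStep st x).1.getD k 0 = ((l ++ [x]).count k : Int)) ∧
      GoodBest (l ++ [x]) (altStep st x).2.1 (altStep st x).2.2 := by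
  have hgrow : ∀ y : List Char, y ≠ x → (l ++ [x]).count y = l.count y := by
    intro y hy; simp [List.count_append, Ne.symm hy]
  have hx : ((l ++ [x]).count x : Int) = (l.count x : Int) + 1 := by
    simp [List.count_append]
  have hmem' : ∀ y : List Char, y ∈ l ++ [x] ↔ y ∈ l ∨ y = x := by
    intro y; simp
  obtain ⟨d, bo, bc⟩ := st
  simp only at hd hb
  have hdict : ∀ k, (d.insert x (d.getD x 0 + 1)).getD k 0 = ((l ++ [x]).count k : Int) := by
    intro k
    rw [PySem.Dict.getD_insert]
    by_cases h : k = x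
    · subst h; rw [if_pos rfl, hd k, hx]
    · rw [if_neg h, hd k, hgrow k h]
  have hc : (d.getD x 0 + 1 : Int) = ((l ++ [x]).count x : Int) := by rw [hd x, hx]
  rcases bo with _ | bk
  · -- first element: l = []
    simp only [GoodBest] at hb
    subst hb
    have heq : altStep (d, none, bc) x = (d.insert x (d.getD x 0 + 1), some x, d.getD x 0 + 1) := rfl
    rw [heq]
    refine ⟨hdict, ?_⟩
    simp only [GoodBest]
    refine ⟨by simp, hc, ?_, ?_⟩
    · intro y hy
      rcases (hmem' y).mp hy with h | hyx
      · simp at h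
      · subst hyx; exact le_of_eq hc.symm
    · intro y hy _
      rcases (hmem' y).mp hy with h | hyx
      · simp at h
      · subst hyx; exact le_refl y
  · -- running best (bk, bc)
    simp only [GoodBest] at hb
    obtain ⟨hmem, hbc, hmax, hmin⟩ := hb
    have heq : altStep (d, some bk, bc) x
        = if d.getD x 0 + 1 > bc ∨ (d.getD x 0 + 1 = bc ∧ x < bk)
          then (d.insert x (d.getD x 0 + 1), some x, d.getD x 0 + 1)
          else (d.insert x (d.getD x 0 + 1), some bk, bc) := rfl
    by_cases hcond : d.getD x 0 + 1 > bc ∨ (d.getD x 0 + 1 = bc ∧ x < bk)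
    · rw [heq, if_pos hcond]
      refine ⟨hdict, ?_⟩
      simp only [GoodBest]
      refine ⟨by simp, hc, ?_, ?_⟩
      · -- maximality of the new best
        intro y hy
        rcases (hmem' y).mp hy with hyl | hyx
        · by_cases hyx : y = x
          · subst hyx; exact le_of_eq hc.symm
          · rw [hgrow y hyx]
            have h1 := hmax y hyl
            rw [hd x] at hcond
            rcases hcond with h | ⟨h, _⟩ <;> omega
        · subst hyx; exact le_of_eq hc.symm
      · -- the new best is the least key attaining the max
        intro y hy hyc
        rcases (hmem' y).mp hy with hyl | hyx
        · by_cases hyx : y = x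
          · exact le_of_eq hyx.symm
          · rw [hgrow y hyx] at hyc
            have h1 := hmax y hyl
            rw [hd x] at hcond
            rcases hcond with h | ⟨h, h3⟩
            · omega
            · exact le_of_lt (lt_of_lt_of_le h3 (hmin y hyl (by omega)))
        · subst hyx; exact le_refl y
    · rw [heq, if_neg hcond]
      refine ⟨hdict, ?_⟩
      simp only [GoodBest]
      push Not at hcond
      obtain ⟨hle, htie⟩ := hcond
      have hbkx : bk ≠ x := by
        intro h; subst h
        rw [hd bk] at hle; omega
      refine ⟨(hmem' bk).mpr (Or.inl hmem), by rw [hgrow bk hbkx, hbc], ?_, ?_⟩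
      · intro y hy
        rcases (hmem' y).mp hy with hyl | hyx
        · by_cases hyx : y = x
          · subst hyx; rw [← hc, hd y]; omega
          · rw [hgrow y hyx]; exact hmax y hyl
        · subst hyx; rw [← hc, hd y]; omega
      · intro y hy hyc
        rcases (hmem' y).mp hy with hyl | hyx
        · by_cases hyx : y = x
          · subst hyx
            rw [← hc, hd y] at hyc
            exact htie (by omega)
          · rw [hgrow y hyx] at hyc; exact hmin y hyl hyc
        · subst hyx; rw [← hc, hd y] at hyc
          exact htie (by omega)

theorem fold_inv (rest : List (List Char)) :
    ∀ (l : List (List Char)) (st : (PySem.Dict (List Char) Int) × Option (List Char) × Int),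
    (∀ k, st.1.getD k 0 = (l.count k : Int)) → GoodBest l st.2.1 st.2.2 →
    (∀ k, (rest.foldl altStep st).1.getD k 0 = ((l ++ rest).count k : Int)) ∧
      GoodBest (l ++ rest) (rest.foldl altStep st).2.1 (rest.foldl altStep st).2.2 := by
  induction rest with
  | nil => intro l st hd hb; simpa using ⟨hd, hb⟩
  | cons x rest ih =>
    intro l st hd hb
    obtain ⟨hd', hb'⟩ := altStep_inv x l st hd hb
    have := ih (l ++ [x]) (altStep st x) hd' hb'
    simpa using this

-- characterisation of A's two extra passes, given B's online best
theorem a_passes (l : List (List Char)) (bk : List Char) (bc : Int)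
    (hgb : GoodBest l (some bk) bc) :
    PySem.List.max? (PySem.Dict.counter l).values (fun v => v) = some bc ∧
    PySem.List.min?
      (((PySem.Dict.counter l).items.filter (fun kv => kv.2 == bc)).map (fun kv => kv.1))
      (fun k => k) = some bk := by
  obtain ⟨hmem, hbc, hmax, hmin⟩ := hgb
  have hitems := PySem.Dict.items_counter l
  have hvals : (PySem.Dict.counter l).values
      = (PySem.Set.ofList l).map (fun k => (List.count k l : Int)) := by
    simp only [PySem.Dict.values, hitems, List.map_map]; rfl
  have hbkS : bk ∈ PySem.Set.ofList l := (PySem.Set.mem_ofList l bk).mpr hmem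
  have hbcv : bc ∈ (PySem.Dict.counter l).values := by
    rw [hvals]; exact List.mem_map.mpr ⟨bk, hbkS, hbc.symm⟩
  -- the max pass
  have hmx : PySem.List.max? (PySem.Dict.counter l).values (fun v => v) = some bc := by
    rcases h : PySem.List.max? (PySem.Dict.counter l).values (fun v => v) with _ | mx
    · exact absurd ((PySem.List.max?_eq_none_iff _ _).mp h ▸ hbcv) (List.not_mem_nil)
    · have h1 := PySem.List.max?_isMax h bc hbcv
      have h2 : mx ≤ bc := by
        have hm := PySem.List.max?_mem h
        rw [hvals] at hm
        obtain ⟨k0, hk0, rfl⟩ := List.mem_map.mp hm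
        exact hmax k0 ((PySem.Set.mem_ofList l k0).mp hk0)
      exact congrArg some (le_antisymm h2 h1)
  refine ⟨hmx, ?_⟩
  -- the min pass
  have hbkf : bk ∈ ((PySem.Dict.counter l).items.filter (fun kv => kv.2 == bc)).map
      (fun kv => kv.1) := by
    refine List.mem_map.mpr ⟨(bk, (List.count bk l : Int)), ?_, rfl⟩
    refine List.mem_filter.mpr ⟨?_, by simp [hbc]⟩
    rw [hitems]; exact List.mem_map.mpr ⟨bk, hbkS, rfl⟩
  rcases h : PySem.List.min?
      (((PySem.Dict.counter l).items.filter (fun kv => kv.2 == bc)).map (fun kv => kv.1))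
      (fun k => k) with _ | m
  · exact absurd ((PySem.List.min?_eq_none_iff _ _).mp h ▸ hbkf) (List.not_mem_nil)
  · have hdec : (fun (a b : List Char) => a.decidableLT b)
        = (@LinearOrder.toDecidableLT (List Char) List.instLinearOrder) := by
      funext a b; exact Subsingleton.elim _ _
    rw [hdec] at h
    have h1 : m ≤ bk := PySem.List.min?_isMin h bk hbkf
    have h2 : bk ≤ m := by
      have hm := @PySem.List.min?_mem (List Char) (List Char) List.instLinearOrder.toLT
        (@LinearOrder.toDecidableLT (List Char) List.instLinearOrder) _ _ _ h
      obtain ⟨⟨k, v⟩, hkv, rfl⟩ := List.mem_map.mp hm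
      obtain ⟨hkv', hv⟩ := List.mem_filter.mp hkv
      rw [hitems] at hkv'
      obtain ⟨k0, hk0, hk0e⟩ := List.mem_map.mp hkv'
      obtain ⟨rfl, rfl⟩ := Prod.mk.injEq .. ▸ hk0e
      simp only [beq_iff_eq] at hv
      exact hmin k0 ((PySem.Set.mem_ofList l k0).mp hk0) hv
    rw [hdec, h]
    exact congrArg some (le_antisymm h1 h2)

-- ===== VERDICT (by name: the statement is the Claim_ definition above) =====
theorem max_3_substring_spec : Claim_equal_max_3_substring := by
  intro s _ hpre
  unfold Spec_max_3_substring
  set l := pvSubs s.toList with hl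
  have hne : l ≠ [] := by
    have h3 : (0 : Int) < (s.toList.length : Int) - 2 := by
      unfold Pre_max_3_substring at hpre; omega
    rw [hl, pvSubs, PySem.List.pyRange_one_cons h3]
    simp
  have hinit : (∀ k, (PySem.Dict.empty : PySem.Dict (List Char) Int).getD k 0 = (([] : List (List Char)).count k : Int)) ∧
      GoodBest [] (none : Option (List Char)) 0 := by
    constructor
    · intro k; simp [PySem.Dict.getD, PySem.Dict.get?, PySem.Dict.empty]
    · simp [GoodBest]
  obtain ⟨hd, hb⟩ := fold_inv l [] (PySem.Dict.empty, none, 0) hinit.1 hinit.2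
  simp only [List.nil_append] at hd hb
  rcases hst : (l.foldl altStep (PySem.Dict.empty, none, 0)).2.1 with _ | bk
  · rw [hst] at hb; simp only [GoodBest] at hb; exact absurd hb hne
  · rw [hst] at hb
    obtain ⟨hmx, hmn⟩ := a_passes l bk _ hb
    unfold max_3_substring max_3_substring_alt
    rw [← hl]
    simp only [hmx, hmn, hst]
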